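-- pv_equiv track=rewrite | github.com/zaalgol/leetcode | closest_power.py | closest_power_of_two_iterative
-- ===== SOURCE A (Python) =====
-- def closest_power_of_two_iterative(x):
--     if x < 1:
--         return 1
--     power = 1
--     while power * 2 <= x:
--         power *= 2
--     next_power = power * 2
--     return power if (x - power) < (next_power - x) else next_power
-- ===== SOURCE B (Python) =====
-- def closest_power_of_two_iterative(x):
--     if x < 1:
--         return 1
--     power = 1 << (x.bit_length() - 1)
--     next_power = power * 2
--     return power if (x - power) < (next_power - x) else next_power
-- ===== Notes on version B (the rewrite author's own statement) =====
-- stated objective: simpler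
-- what changed: Replaced the doubling while-loop by a closed-form computation of the largest power of two <= x via int.bit_length, keeping the same midpoint tie-break.
import Mathlib
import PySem

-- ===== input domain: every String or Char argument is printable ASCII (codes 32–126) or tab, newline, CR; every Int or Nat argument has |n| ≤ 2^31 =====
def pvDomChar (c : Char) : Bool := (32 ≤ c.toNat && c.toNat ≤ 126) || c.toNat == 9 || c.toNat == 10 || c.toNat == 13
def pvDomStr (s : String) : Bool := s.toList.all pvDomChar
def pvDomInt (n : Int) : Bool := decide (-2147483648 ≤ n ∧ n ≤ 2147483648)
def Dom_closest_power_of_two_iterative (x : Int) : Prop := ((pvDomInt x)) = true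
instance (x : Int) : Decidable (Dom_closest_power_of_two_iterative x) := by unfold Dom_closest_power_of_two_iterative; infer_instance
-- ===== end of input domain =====

-- B replaces A's doubling loop by a closed-form bit_length computation of the
-- largest power of two ≤ x (objective: simpler, closed form instead of a loop).

-- ===== PORT A =====
-- the while loop: keep doubling power while power*2 ≤ x
def pvLoopA (x power : Int) : Int :=
  if h : power * 2 ≤ x ∧ 1 ≤ power then
    pvLoopA x (power * 2)
  else power
termination_by (x - power).toNat
decreasing_by
  obtain ⟨h1, h2⟩ := h; omega

def closest_power_of_two_iterative (x : Int) : Int :=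
  if x < 1 then 1
  else
    let power := pvLoopA x 1
    let next_power := power * 2
    if x - power < next_power - x then power else next_power

-- ===== PORT B =====
-- x.bit_length() - 1 for x ≥ 1 is Nat.log2 of x; 1 << k is 2^k
def closest_power_of_two_iterative_alt (x : Int) : Int :=
  if x < 1 then 1
  else
    let power : Int := 2 ^ x.toNat.log2
    let next_power := power * 2
    if x - power < next_power - x then power else next_power

-- ===== PRECONDITION & SPEC =====
def Spec_closest_power_of_two_iterative (x : Int) (out : Int) : Prop := out = closest_power_of_two_iterative_alt x
instance (x : Int) (out : Int) : Decidable (Spec_closest_power_of_two_iterative x out) := by unfold Spec_closest_power_of_two_iterative; infer_instance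

-- ===== CLAIM (what is proved, stated in full; the proofs are below) =====
def Claim_equal_closest_power_of_two_iterative : Prop := ∀ (x : Int), Dom_closest_power_of_two_iterative x → Spec_closest_power_of_two_iterative x (closest_power_of_two_iterative x)

-- ===== LEMMAS AND PROOFS =====

-- the loop, started at 2^k ≤ x, returns 2^(log2 x)
theorem pvLoopA_pow (x : Int) (n : Nat) (hx : 1 ≤ x) (k : Nat)
    (hk : (2:Int) ^ k ≤ x) (hfuel : (x - 2 ^ k).toNat ≤ n) :
    pvLoopA x ((2:Int) ^ k) = (2:Int) ^ x.toNat.log2 := by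
  induction n generalizing k with
  | zero =>
      -- fuel 0: x - 2^k ≤ 0, so 2^k = x is impossible unless 2^k ≥ x; then loop stops
      have hpow1 : (1:Int) ≤ 2 ^ k := one_le_pow₀ (by norm_num)
      have hstop : ¬ ((2:Int) ^ k * 2 ≤ x) := by
        intro hc
        have : (2:Int)^k ≤ x - 2^k := by linarith
        omega
      rw [pvLoopA]
      simp only [hstop, false_and, dite_false]
      -- here 2^k ≤ x < 2^(k+1), so k = log2 x.toNat
      congr 1
      have hxk : (2:Nat) ^ k ≤ x.toNat := by
        have := hk; zify; omega
      have hxk2 : x.toNat < 2 ^ (k+1) := by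
        have hc : x < (2:Int)^k * 2 := lt_of_not_ge hstop
        have : x < (2:Int)^(k+1) := by rw [pow_succ]; exact hc
        zify; omega
      have hlog := Nat.log2_self_le (n := x.toNat) (by omega)
      have hlog2 := Nat.lt_log2_self (n := x.toNat)
      -- uniqueness of k with 2^k ≤ n < 2^(k+1)
      by_contra hne
      rcases Nat.lt_or_ge k x.toNat.log2 with h | h
      · have : (2:Nat)^(k+1) ≤ 2^x.toNat.log2 := Nat.pow_le_pow_right (by norm_num) (by omega)
        omega
      · have hlt : x.toNat.log2 < k := by omega
        have : (2:Nat)^(x.toNat.log2+1) ≤ 2^k := Nat.pow_le_pow_right (by norm_num) (by omega)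
        omega
  | succ n ih =>
      rw [pvLoopA]
      by_cases hc : (2:Int) ^ k * 2 ≤ x
      · have hpow1 : (1:Int) ≤ 2 ^ k := one_le_pow₀ (by norm_num)
        rw [dif_pos ⟨hc, hpow1⟩]
        have hk2 : (2:Int) ^ (k+1) ≤ x := by rw [pow_succ]; exact hc
        have hfu : (x - 2 ^ (k+1)).toNat ≤ n := by rw [pow_succ]; omega
        rw [← pow_succ]
        exact ih (k+1) hk2 hfu
      · simp only [hc, false_and, dite_false]
        -- same stop case as above
        have hpow1 : (1:Int) ≤ 2 ^ k := one_le_pow₀ (by norm_num)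
        congr 1
        have hxk : (2:Nat) ^ k ≤ x.toNat := by
          have := hk; zify; omega
        have hxk2 : x.toNat < 2 ^ (k+1) := by
          have hc' : x < (2:Int)^k * 2 := lt_of_not_ge hc
          have : x < (2:Int)^(k+1) := by rw [pow_succ]; exact hc'
          zify; omega
        have hlog := Nat.log2_self_le (n := x.toNat) (by omega)
        have hlog2 := Nat.lt_log2_self (n := x.toNat)
        by_contra hne
        rcases Nat.lt_or_ge k x.toNat.log2 with h | h
        · have : (2:Nat)^(k+1) ≤ 2^x.toNat.log2 := Nat.pow_le_pow_right (by norm_num) (by omega)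
          omega
        · have : (2:Nat)^(x.toNat.log2+1) ≤ 2^k := Nat.pow_le_pow_right (by norm_num) (by omega)
          omega

theorem pvLoopA_one (x : Int) (hx : 1 ≤ x) :
    pvLoopA x 1 = (2:Int) ^ x.toNat.log2 := by
  have := pvLoopA_pow x (x - 1).toNat hx 0 (by simpa using hx) (by simp)
  simpa using this

-- ===== VERDICT (by name: the statement is the Claim_ definition above) =====
theorem closest_power_of_two_iterative_spec : Claim_equal_closest_power_of_two_iterative := by
  intro x _
  unfold Spec_closest_power_of_two_iterative
  unfold closest_power_of_two_iterative closest_power_of_two_iterative_alt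
  by_cases h : x < 1
  · simp [h]
  · simp only [h, if_false]
    rw [pvLoopA_one x (by omega)]
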